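-- pv_equiv track=rewrite | github.com/thehalleyyoung/deppy | tests/test_examples/004_suffix_array_construction.py | SPEC
-- ===== SOURCE A (Python) =====
-- def SPEC(s, result):
--     """Verify suffix array correctness:
--     1) It's a permutation of 0..n-1.
--     2) Consecutive suffixes in the array are lexicographically ordered.
--     """
--     n = len(s)
--     if not isinstance(result, list):
--         return False
--     if len(result) != n:
--         return False
--
--     # Check permutation
--     if sorted(result) != list(range(n)):
--         return False
--
--     # Check lexicographic ordering
--     for i in range(n - 1):
--         suffix_a = s[result[i]:]
--         suffix_b = s[result[i + 1]:]
--         if suffix_a > suffix_b: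
--             return False
--
--     return True
-- ===== SOURCE B (Python) =====
-- def SPEC(s, result):
--     n = len(s)
--     if not isinstance(result, list) or len(result) != n:
--         return False
--     # rank = inverse permutation; building it also verifies result is a permutation of 0..n-1
--     rank = [-1] * n
--     for i, p in enumerate(result):
--         if not (0 <= p < n) or rank[p] != -1:
--             return False
--         rank[p] = i
--     # consecutive suffixes compared via first character and rank of the next suffix
--     for i in range(n - 1):
--         p, q = result[i], result[i + 1]
--         if s[p] > s[q]:
--             return False
--         if s[p] == s[q]:
--             rp = rank[p + 1] if p + 1 < n else -1
--             rq = rank[q + 1] if q + 1 < n else -1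
--             if rp > rq:
--                 return False
--     return True
-- ===== Notes on version B (the rewrite author's own statement) =====
-- stated objective: faster
-- what changed: Instead of slicing and lexicographically comparing whole consecutive suffixes (O(n) each, O(n^2) total), B builds the inverse-permutation rank array once (which simultaneously verifies the permutation property without sorting) and decides each consecutive pair in O(1) by comparing first characters and, on a tie, the ranks of the two next suffixes.
import Mathlib
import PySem

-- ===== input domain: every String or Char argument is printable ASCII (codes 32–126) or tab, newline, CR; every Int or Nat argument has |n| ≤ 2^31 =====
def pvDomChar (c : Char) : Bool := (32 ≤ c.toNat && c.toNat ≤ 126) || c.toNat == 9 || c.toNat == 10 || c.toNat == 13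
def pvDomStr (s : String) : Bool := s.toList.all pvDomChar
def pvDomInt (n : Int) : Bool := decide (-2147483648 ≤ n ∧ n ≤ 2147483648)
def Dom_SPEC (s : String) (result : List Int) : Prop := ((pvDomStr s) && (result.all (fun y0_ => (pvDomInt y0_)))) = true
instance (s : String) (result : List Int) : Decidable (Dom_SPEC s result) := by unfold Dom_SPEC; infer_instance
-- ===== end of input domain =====

-- B replaces A's O(n^2) consecutive suffix comparisons by an inverse-permutation rank array:
-- each consecutive pair is compared via its first characters and the ranks of the next suffixes.

-- ===== PORT A =====
-- loop 'for i in range(n-1): ... if suffix_a > suffix_b: return False'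
def pvLoopA (t : List Char) (result : List Int) : List Int → Bool
  | [] => true
  | i :: rest =>
      let suffix_a := PySem.List.slice t (some (PySem.List.pyGetD result i 0)) none
      let suffix_b := PySem.List.slice t (some (PySem.List.pyGetD result (i + 1) 0)) none
      if suffix_b < suffix_a then false else pvLoopA t result rest

-- Python string slices/comparisons are ported through s.toList (PySem.Chars); '>' on str is '<' flipped on List Char
def SPEC (s : String) (result : List Int) : Bool :=
  let t := s.toList
  let n := t.length
  if result.length = n then
    if PySem.List.sorted result (fun x => x) false = PySem.List.pyRange 0 (n : Int) 1 then
      pvLoopA t result (PySem.List.pyRange 0 ((n : Int) - 1) 1)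
    else false
  else false

-- ===== PORT B =====
-- 'for i, p in enumerate(result): check 0 <= p < n and rank[p] == -1; rank[p] = i' (None = early 'return False')
def pvBuildRank (n : Nat) : List Int → Int → List Int → Option (List Int)
  | [], _, rank => some rank
  | p :: rest, i, rank =>
      if 0 ≤ p ∧ p < (n : Int) then
        if PySem.List.pyGetD rank p 0 = -1 then
          pvBuildRank n rest (i + 1) (rank.set p.toNat i)
        else none
      else none

-- second loop of B; comparing the 1-char strings s[p], s[q] is exactly comparing the chars
def pvLoopB (t : List Char) (result rank : List Int) : List Int → Bool
  | [] => true
  | i :: rest =>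
      let p := PySem.List.pyGetD result i 0
      let q := PySem.List.pyGetD result (i + 1) 0
      let cp := PySem.List.pyGetD t p ' '
      let cq := PySem.List.pyGetD t q ' '
      if cq < cp then false
      else if cp = cq then
        let rp := if p + 1 < (t.length : Int) then PySem.List.pyGetD rank (p + 1) 0 else -1
        let rq := if q + 1 < (t.length : Int) then PySem.List.pyGetD rank (q + 1) 0 else -1
        if rq < rp then false else pvLoopB t result rank rest
      else pvLoopB t result rank rest

def SPEC_alt (s : String) (result : List Int) : Bool :=
  let t := s.toList
  let n := t.length
  if result.length = n then
    match pvBuildRank n result 0 (List.replicate n (-1 : Int)) with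
    | none => false
    | some rank => pvLoopB t result rank (PySem.List.pyRange 0 ((n : Int) - 1) 1)
  else false

-- ===== PRECONDITION & SPEC =====
def Spec_SPEC (s : String) (result : List Int) (out : Bool) : Prop := out = SPEC_alt s result
instance (s : String) (result : List Int) (out : Bool) : Decidable (Spec_SPEC s result out) := by unfold Spec_SPEC; infer_instance

-- ===== CLAIM (what is proved, stated in full; the proofs are below) =====
def Claim_equal_SPEC : Prop := ∀ (s : String) (result : List Int), Dom_SPEC s result → Spec_SPEC s result (SPEC s result)

-- ===== LEMMAS AND PROOFS =====

-- order facts on List Char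
lemma pv_cons_le_iff (a b : Char) (u v : List Char) : (a::u ≤ b::v) ↔ (a < b ∨ (a = b ∧ u ≤ v)) := by
  rw [← not_lt, List.cons_lt_cons_iff]
  rcases lt_trichotomy a b with h | h | h
  · simp [h, (asymm h : ¬ b < a), (h.ne' : ¬ b = a)]
  · subst h; simp [not_lt]
  · simp only [eq_false (asymm h : ¬ a < b), false_or]
    constructor
    · intro hn; exact absurd (Or.inl h) hn
    · rintro ⟨he, _⟩; exact absurd he.symm h.ne

-- consecutive ≤ extends to all pairs
lemma pv_consec_le {α : Type} [LinearOrder α] (f : Nat → α) (m : Nat)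
    (h : ∀ k, k + 1 < m → f k ≤ f (k + 1)) : ∀ i j, i ≤ j → j < m → f i ≤ f j := by
  intro i j hij hjm
  induction j with
  | zero => have : i = 0 := Nat.le_zero.mp hij; subst this; exact le_refl _
  | succ j ih =>
    rcases Nat.lt_or_ge i (j + 1) with hlt | hge
    · exact le_trans (ih (by omega) (by omega)) (h j hjm)
    · have : i = j + 1 := le_antisymm hij hge
      subst this; exact le_refl _

lemma pv_getD_set_self (l : List Int) (m : Nat) (a : Int) (h : m < l.length) :
    (l.set m a).getD m 0 = a := by
  rw [List.getD_eq_getElem _ _ (by simpa using h)]; simp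

lemma pv_getD_set_ne (l : List Int) (m k : Nat) (a : Int) (h : m ≠ k) :
    (l.set m a).getD k 0 = l.getD k 0 := by
  simp [List.getD, h]

lemma pv_idxOf_map (rn : List Nat) (j : Nat) :
    List.idxOf (j:Int) (List.map (fun k : Nat => (k : Int)) rn) = rn.idxOf j := by
  induction rn with
  | nil => rfl
  | cons a l ih =>
    rw [List.map_cons, List.idxOf_cons, List.idxOf_cons, ih]
    by_cases h : a = j
    · subst h; simp
    · have h1 : ((a:Int) == (j:Int)) = false := by simp [h]
      have h2 : (a == j) = false := by simp [h]
      rw [h1, h2]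

lemma pv_idxOf_cons_self (p : Int) (l : List Int) : List.idxOf p (p :: l) = 0 := by
  simp

lemma pv_idxOf_cons_ne (p q : Int) (l : List Int) (h : q ≠ p) :
    List.idxOf q (p :: l) = List.idxOf q l + 1 := by
  rw [List.idxOf_cons]
  have : (p == q) = false := by simp [Ne.symm h]
  rw [this]; rfl

-- extended rank: position of suffix x in the order claimed by rn (the empty suffix gets -1)
def pvErk (rn : List Nat) (n x : Nat) : Int := if x < n then (rn.idxOf x : Int) else -1

def pvCondA (t : List Char) (rn : List Nat) (k : Nat) : Prop :=
  t.drop (rn.getD k 0) ≤ t.drop (rn.getD (k + 1) 0)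

def pvCondB (t : List Char) (rn : List Nat) (k : Nat) : Prop :=
  t.getD (rn.getD k 0) ' ' ≤ t.getD (rn.getD (k + 1) 0) ' ' ∧
  (t.getD (rn.getD k 0) ' ' = t.getD (rn.getD (k + 1) 0) ' ' →
    pvErk rn t.length (rn.getD k 0 + 1) ≤ pvErk rn t.length (rn.getD (k + 1) 0 + 1))

-- the heart of the equivalence: full lexicographic sortedness of the suffixes named by a
-- permutation rn ↔ the first-char/next-rank check, proved by induction on compared prefix length
theorem pvCore (t : List Char) (rn : List Nat) (hp : rn.Perm (List.range t.length)) :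
    (∀ k, k + 1 < t.length → pvCondA t rn k) ↔ (∀ k, k + 1 < t.length → pvCondB t rn k) := by
  have hlen : rn.length = t.length := by simpa using hp.length_eq
  have hmem : ∀ x, x ∈ rn ↔ x < t.length := by
    intro x; rw [hp.mem_iff, List.mem_range]
  have hnd : rn.Nodup := hp.nodup_iff.mpr List.nodup_range
  have helt : ∀ k, k < t.length → rn.getD k 0 < t.length := by
    intro k hk
    have hk' : k < rn.length := by omega
    rw [List.getD_eq_getElem rn 0 hk']
    exact (hmem _).mp (List.getElem_mem _)
  have hidx : ∀ x, x < t.length → rn.getD (rn.idxOf x) 0 = x := by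
    intro x hx
    have hm : x ∈ rn := (hmem x).mpr hx
    have hlt := List.idxOf_lt_length_of_mem hm
    rw [List.getD_eq_getElem rn 0 hlt]
    exact List.getElem_idxOf hlt
  have hidxlt : ∀ x, x < t.length → rn.idxOf x < t.length := by
    intro x hx
    exact hlen ▸ List.idxOf_lt_length_of_mem ((hmem x).mpr hx)
  constructor
  · -- A → B
    intro HA k hk
    have all_le : ∀ i j, i ≤ j → j < t.length → t.drop (rn.getD i 0) ≤ t.drop (rn.getD j 0) :=
      pv_consec_le (fun k => t.drop (rn.getD k 0)) t.length (fun k hk => HA k hk)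
    have strict : ∀ i j, i < j → j < t.length → t.drop (rn.getD i 0) < t.drop (rn.getD j 0) := by
      intro i j hij hj
      refine lt_of_le_of_ne (all_le i j hij.le hj) ?_
      intro heq
      have hpi := helt i (lt_trans hij hj)
      have hpj := helt j hj
      have hlq := congrArg List.length heq
      simp only [List.length_drop] at hlq
      have hv : rn.getD i 0 = rn.getD j 0 := by omega
      rw [List.getD_eq_getElem rn 0 (show i < rn.length by omega),
        List.getD_eq_getElem rn 0 (show j < rn.length by omega)] at hv
      exact hij.ne ((List.Nodup.getElem_inj_iff hnd).mp hv)
    have hcons := strict k (k + 1) (Nat.lt_succ_self k) hk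
    have hpn := helt k (by omega)
    have hqn := helt (k + 1) hk
    rw [List.drop_eq_getElem_cons hpn, List.drop_eq_getElem_cons hqn,
      List.cons_lt_cons_iff] at hcons
    have e1 : t.getD (rn.getD k 0) ' ' = t[rn.getD k 0]'hpn := List.getD_eq_getElem t ' ' hpn
    have e2 : t.getD (rn.getD (k + 1) 0) ' ' = t[rn.getD (k + 1) 0]'hqn := List.getD_eq_getElem t ' ' hqn
    constructor
    · rw [e1, e2]
      rcases hcons with h | ⟨he, _⟩
      · exact le_of_lt h
      · exact le_of_eq he
    · intro heq
      rw [e1, e2] at heq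
      have hsuf : t.drop (rn.getD k 0 + 1) < t.drop (rn.getD (k + 1) 0 + 1) := by
        rcases hcons with h | ⟨_, h⟩
        · exact absurd heq h.ne
        · exact h
      rcases Nat.lt_or_ge (rn.getD (k + 1) 0 + 1) t.length with hq1 | hq1
      · rcases Nat.lt_or_ge (rn.getD k 0 + 1) t.length with hp1 | hp1
        · simp only [pvErk, if_pos hp1, if_pos hq1, Int.ofNat_le]
          by_contra hcon
          push Not at hcon
          have hle2 := all_le (rn.idxOf (rn.getD (k + 1) 0 + 1)) (rn.idxOf (rn.getD k 0 + 1))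
            (le_of_lt (by exact_mod_cast hcon)) (hidxlt _ hp1)
          rw [hidx _ hq1, hidx _ hp1] at hle2
          exact absurd hle2 (not_le.mpr hsuf)
        · simp only [pvErk, if_pos hq1, if_neg (by omega : ¬ rn.getD k 0 + 1 < t.length)]
          omega
      · exfalso
        have : rn.getD (k + 1) 0 + 1 = t.length := by
          have := helt (k + 1) hk; omega
        rw [this, List.drop_length] at hsuf
        exact List.not_lt_nil _ hsuf
  · -- B → A
    intro HB
    have key : ∀ ℓ i j, i ≤ j → j < t.length →
        (t.drop (rn.getD i 0)).take ℓ ≤ (t.drop (rn.getD j 0)).take ℓ := by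
      intro ℓ
      induction ℓ with
      | zero => intro i j _ _; simp
      | succ ℓ ih =>
        refine pv_consec_le (fun k => (t.drop (rn.getD k 0)).take (ℓ + 1)) t.length ?_
        intro k hk
        show (t.drop (rn.getD k 0)).take (ℓ + 1) ≤ (t.drop (rn.getD (k + 1) 0)).take (ℓ + 1)
        have hpn := helt k (by omega)
        have hqn := helt (k + 1) hk
        obtain ⟨h1, h2⟩ := HB k hk
        rw [List.getD_eq_getElem t ' ' hpn, List.getD_eq_getElem t ' ' hqn] at h1 h2
        rw [List.drop_eq_getElem_cons hpn, List.drop_eq_getElem_cons hqn,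
          List.take_succ_cons, List.take_succ_cons, pv_cons_le_iff]
        rcases lt_or_eq_of_le h1 with hlt | heq
        · exact Or.inl hlt
        · refine Or.inr ⟨heq, ?_⟩
          have h2' := h2 heq
          rcases Nat.lt_or_ge (rn.getD k 0 + 1) t.length with hp1 | hp1
          · rcases Nat.lt_or_ge (rn.getD (k + 1) 0 + 1) t.length with hq1 | hq1
            · simp only [pvErk, if_pos hp1, if_pos hq1, Int.ofNat_le] at h2'
              have := ih (rn.idxOf (rn.getD k 0 + 1)) (rn.idxOf (rn.getD (k + 1) 0 + 1))
                h2' (hidxlt _ hq1)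
              rwa [hidx _ hp1, hidx _ hq1] at this
            · exfalso
              simp only [pvErk, if_pos hp1,
                if_neg (by omega : ¬ rn.getD (k + 1) 0 + 1 < t.length)] at h2'
              omega
          · have : rn.getD k 0 + 1 = t.length := by omega
            rw [this, List.drop_length, List.take_nil]
            exact not_lt.mp (List.not_lt_nil _)
    intro k hk
    have := key t.length k (k + 1) (Nat.le_succ k) hk
    rwa [List.take_of_length_le (by simp), List.take_of_length_le (by simp)] at this

-- pvBuildRank: success characterisation and the contents of the rank array
lemma pvBuildRank_sound (n : Nat) : ∀ (rest : List Int) (i : Int) (rank r : List Int),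
    pvBuildRank n rest i rank = some r → rank.length = n → 0 ≤ i →
    r.length = n ∧ rest.Nodup ∧
    (∀ p ∈ rest, 0 ≤ p ∧ p < (n : Int) ∧ rank.getD p.toNat 0 = -1) ∧
    (∀ j : Nat, j < n → r.getD j 0 =
        if (j : Int) ∈ rest then i + (List.idxOf (j : Int) rest : Int) else rank.getD j 0) := by
  intro rest
  induction rest with
  | nil =>
    intro i rank r h hl hi
    simp only [pvBuildRank, Option.some_inj] at h
    subst h
    exact ⟨hl, List.nodup_nil, by simp, fun j hj => by simp⟩
  | cons p rest ih =>
    intro i rank r h hl hi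
    simp only [pvBuildRank] at h
    split_ifs at h with hc1 hc2
    · obtain ⟨hp0, hpn⟩ := hc1
      have hpt : p.toNat < n := by omega
      have hlr : (rank.set p.toNat i).length = n := by simpa using hl
      obtain ⟨hrl, hnd, hrange, hform⟩ := ih (i + 1) (rank.set p.toNat i) r h hlr (by omega)
      have hpm1 : rank.getD p.toNat 0 = -1 := by
        rw [PySem.List.pyGetD_of_nonneg rank 0 hp0] at hc2; exact hc2
      have hpnotin : p ∉ rest := by
        intro hmem
        obtain ⟨_, _, hval⟩ := hrange p hmem
        rw [pv_getD_set_self _ _ _ (by omega : p.toNat < rank.length)] at hval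
        omega
      refine ⟨hrl, List.nodup_cons.mpr ⟨hpnotin, hnd⟩, ?_, ?_⟩
      · intro q hq
        rcases List.mem_cons.mp hq with rfl | hq'
        · exact ⟨hp0, hpn, hpm1⟩
        · obtain ⟨hq0, hqn, hval⟩ := hrange q hq'
          refine ⟨hq0, hqn, ?_⟩
          by_cases hqp : q.toNat = p.toNat
          · exfalso
            rw [hqp, pv_getD_set_self _ _ _ (by omega : p.toNat < rank.length)] at hval
            omega
          · rwa [pv_getD_set_ne _ _ _ _ (Ne.symm hqp)] at hval
      · intro j hj
        by_cases hjp : (j : Int) = p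
        · have hjt : j = p.toNat := by omega
          have hnotin : (j : Int) ∉ rest := hjp ▸ hpnotin
          rw [hform j hj, if_neg hnotin, if_pos (by rw [hjp]; exact List.mem_cons_self),
            hjp, pv_idxOf_cons_self, hjt,
            pv_getD_set_self _ _ _ (by omega : p.toNat < rank.length)]
          simp
        · rw [hform j hj]
          by_cases hjr : (j : Int) ∈ rest
          · rw [if_pos hjr, if_pos (List.mem_cons.mpr (Or.inr hjr)),
              pv_idxOf_cons_ne _ _ _ hjp]
            push_cast; ring
          · rw [if_neg hjr, if_neg (by simp [List.mem_cons, hjp, hjr]),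
              pv_getD_set_ne _ _ _ _ (fun he => hjp (by omega))]

lemma pvBuildRank_complete (n : Nat) : ∀ (rest : List Int) (i : Int) (rank : List Int),
    rank.length = n → 0 ≤ i → rest.Nodup →
    (∀ p ∈ rest, 0 ≤ p ∧ p < (n : Int) ∧ rank.getD p.toNat 0 = -1) →
    (pvBuildRank n rest i rank).isSome := by
  intro rest
  induction rest with
  | nil => intro i rank _ _ _ _; simp [pvBuildRank]
  | cons p rest ih =>
    intro i rank hl hi hnd hr
    obtain ⟨hp0, hpn, hpm⟩ := hr p List.mem_cons_self
    simp only [pvBuildRank]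
    rw [if_pos ⟨hp0, hpn⟩,
      if_pos (by rw [PySem.List.pyGetD_of_nonneg rank 0 hp0]; exact hpm)]
    apply ih (i + 1) _ (by simpa using hl) (by omega) (List.nodup_cons.mp hnd).2
    intro q hq
    obtain ⟨hq0, hqn, hqm⟩ := hr q (List.mem_cons.mpr (Or.inr hq))
    refine ⟨hq0, hqn, ?_⟩
    have hne : q.toNat ≠ p.toNat := by
      intro he
      have : q = p := by omega
      exact (List.nodup_cons.mp hnd).1 (this ▸ hq)
    rw [pv_getD_set_ne _ _ _ _ (Ne.symm hne)]; exact hqm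

-- loop characterisations
lemma pvLoopA_iff (t : List Char) (result : List Int) (l : List Int) :
    pvLoopA t result l = true ↔ ∀ i ∈ l,
      ¬ (PySem.List.slice t (some (PySem.List.pyGetD result (i + 1) 0)) none <
         PySem.List.slice t (some (PySem.List.pyGetD result i 0)) none) := by
  induction l with
  | nil => simp [pvLoopA]
  | cons i rest ih =>
    by_cases hc : PySem.List.slice t (some (PySem.List.pyGetD result (i + 1) 0)) none <
        PySem.List.slice t (some (PySem.List.pyGetD result i 0)) none
    · simp [pvLoopA, hc]
    · simp [pvLoopA, hc, ih, not_lt.mp hc]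

def pvBodyB (t : List Char) (result rank : List Int) (i : Int) : Prop :=
  ¬ (PySem.List.pyGetD t (PySem.List.pyGetD result (i + 1) 0) ' ' <
     PySem.List.pyGetD t (PySem.List.pyGetD result i 0) ' ') ∧
  (PySem.List.pyGetD t (PySem.List.pyGetD result i 0) ' ' =
     PySem.List.pyGetD t (PySem.List.pyGetD result (i + 1) 0) ' ' →
   ¬ ((if PySem.List.pyGetD result (i + 1) 0 + 1 < (t.length : Int)
        then PySem.List.pyGetD rank (PySem.List.pyGetD result (i + 1) 0 + 1) 0 else -1) <
      (if PySem.List.pyGetD result i 0 + 1 < (t.length : Int)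
        then PySem.List.pyGetD rank (PySem.List.pyGetD result i 0 + 1) 0 else -1)))

lemma pvLoopB_iff (t : List Char) (result rank : List Int) (l : List Int) :
    pvLoopB t result rank l = true ↔ ∀ i ∈ l, pvBodyB t result rank i := by
  induction l with
  | nil => simp [pvLoopB]
  | cons i rest ih =>
    by_cases h1 : PySem.List.pyGetD t (PySem.List.pyGetD result (i + 1) 0) ' ' <
        PySem.List.pyGetD t (PySem.List.pyGetD result i 0) ' '
    · simp [pvLoopB, h1, pvBodyB]
    · by_cases h2 : PySem.List.pyGetD t (PySem.List.pyGetD result i 0) ' ' =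
          PySem.List.pyGetD t (PySem.List.pyGetD result (i + 1) 0) ' '
      · by_cases h3 : (if PySem.List.pyGetD result (i + 1) 0 + 1 < (t.length : Int)
            then PySem.List.pyGetD rank (PySem.List.pyGetD result (i + 1) 0 + 1) 0 else -1) <
            (if PySem.List.pyGetD result i 0 + 1 < (t.length : Int)
            then PySem.List.pyGetD rank (PySem.List.pyGetD result i 0 + 1) 0 else -1)
        · simp [pvLoopB, h2, h3, pvBodyB]
        · simp [pvLoopB, h2, h3, pvBodyB, ih, not_lt.mp h3]
      · simp [pvLoopB, h1, h2, pvBodyB, ih, not_lt.mp h1]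

-- A's permutation test
lemma pv_sorted_iff_perm (result : List Int) (n : Nat) :
    (PySem.List.sorted result (fun x => x) false = PySem.List.pyRange 0 (n : Int) 1) ↔
    result.Perm (List.map (fun k : Nat => (k : Int)) (List.range n)) := by
  have hr : PySem.List.pyRange 0 (n : Int) 1 = List.map (fun k : Nat => (k : Int)) (List.range n) := by
    simpa using PySem.List.pyRange_zero_nat n
  rw [hr]
  constructor
  · intro h; rw [← h]; exact (PySem.List.sorted_perm result (fun x : Int => x) false).symm
  · intro h
    apply PySem.List.sorted_id_eq_of_perm_of_pairwise
    · exact h.symm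
    · rw [← hr]
      exact (PySem.List.pairwise_lt_pyRange_one 0 (n : Int)).imp le_of_lt

-- B's permutation test agrees
lemma pv_perm_iff (result : List Int) (n : Nat) (hl : result.length = n) :
    result.Perm (List.map (fun k : Nat => (k : Int)) (List.range n)) ↔
    (result.Nodup ∧ ∀ p ∈ result, 0 ≤ p ∧ p < (n : Int)) := by
  constructor
  · intro h
    constructor
    · refine h.nodup_iff.mpr (List.Nodup.map ?_ List.nodup_range)
      intro a b hab; simpa using hab
    · intro p hp
      have := h.mem_iff.mp hp
      obtain ⟨k, hk, rfl⟩ := List.mem_map.mp this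
      have := List.mem_range.mp hk
      exact ⟨Int.natCast_nonneg k, by exact_mod_cast this⟩
  · rintro ⟨hnd, hrange⟩
    have hsub : result ⊆ List.map (fun k : Nat => (k : Int)) (List.range n) := by
      intro p hp
      obtain ⟨h0, h1⟩ := hrange p hp
      refine List.mem_map.mpr ⟨p.toNat, List.mem_range.mpr (by omega), by omega⟩
    have hsp := List.subperm_of_subset hnd hsub
    exact hsp.perm_of_length_le (by simp [hl])

-- the equivalence, input by input
lemma pv_main (s : String) (result : List Int) : SPEC s result = SPEC_alt s result := by
  unfold SPEC SPEC_alt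
  simp only []
  by_cases hlen : result.length = s.toList.length
  swap
  · rw [if_neg hlen, if_neg hlen]
  rw [if_pos hlen, if_pos hlen]
  set t := s.toList with ht
  set n := t.length with hn
  by_cases hperm : result.Perm (List.map (fun k : Nat => (k : Int)) (List.range n))
  swap
  · -- not a permutation: A's sorted test fails, B's rank construction fails
    rw [if_neg (fun h => hperm ((pv_sorted_iff_perm result n).mp h))]
    rcases hbr : pvBuildRank n result 0 (List.replicate n (-1 : Int)) with _ | rank
    · rfl
    · exfalso
      obtain ⟨_, hnd, hrange, _⟩ := pvBuildRank_sound n result 0 _ rank hbr (by simp) le_rfl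
      exact hperm ((pv_perm_iff result n hlen).mpr ⟨hnd, fun p hp => ⟨(hrange p hp).1, (hrange p hp).2.1⟩⟩)
  · rw [if_pos ((pv_sorted_iff_perm result n).mpr hperm)]
    -- B's rank construction succeeds
    have hnd : result.Nodup := ((pv_perm_iff result n hlen).mp hperm).1
    have hrange := ((pv_perm_iff result n hlen).mp hperm).2
    have hsome := pvBuildRank_complete n result 0 (List.replicate n (-1 : Int)) (by simp) le_rfl hnd
      (fun p hp => ⟨(hrange p hp).1, (hrange p hp).2, by
        have h0 := (hrange p hp).1
        have h1 := (hrange p hp).2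
        rw [List.getD_eq_getElem _ _ (by simpa using (by omega : p.toNat < n))]
        simp⟩)
    rcases hbr : pvBuildRank n result 0 (List.replicate n (-1 : Int)) with _ | rank
    · rw [hbr] at hsome; simp at hsome
    · -- both run their loops; relate them through pvCore
      obtain ⟨hrl, _, _, hform⟩ := pvBuildRank_sound n result 0 _ rank hbr (by simp) le_rfl
      -- the underlying Nat permutation
      set rn : List Nat := result.map Int.toNat with hrn
      have hres : result = List.map (fun k : Nat => (k : Int)) rn := by
        rw [hrn, List.map_map]
        symm
        refine (List.map_congr_left ?_).trans (List.map_id result)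
        intro p hp
        simp [Int.toNat_of_nonneg (hrange p hp).1]
      have hrp : rn.Perm (List.range n) := by
        have := hperm.map Int.toNat
        rw [List.map_map] at this
        simpa [Function.comp_def] using this
      have hrnlen : rn.length = n := by rw [hrn]; simpa using hlen
      -- value bridges
      have hgetres : ∀ k : Nat, k < n → PySem.List.pyGetD result (k : Int) 0 = ((rn.getD k 0 : Nat) : Int) := by
        intro k hk
        have hk' : k < result.length := by omega
        rw [PySem.List.pyGetD_natCast, List.getD_eq_getElem _ _ hk',
          List.getD_eq_getElem _ _ (by omega : k < rn.length)]
        have he : rn[k]'(by omega) = (result[k]'hk').toNat := by simp [hrn]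
        rw [he, Int.toNat_of_nonneg ((hrange _ (result.getElem_mem hk')).1)]
      have hmemres : ∀ j : Nat, j < n → (j : Int) ∈ result := by
        intro j hj
        rw [hres]
        exact List.mem_map.mpr ⟨j, by
          rw [hrp.mem_iff]; exact List.mem_range.mpr hj, rfl⟩
      have hrank : ∀ j : Nat, j < n → PySem.List.pyGetD rank (j : Int) 0 = (rn.idxOf j : Int) := by
        intro j hj
        rw [PySem.List.pyGetD_natCast, hform j hj, if_pos (hmemres j hj)]
        rw [hres, pv_idxOf_map]
        ring
      -- element bounds
      have hel : ∀ k : Nat, k < n → rn.getD k 0 < n := by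
        intro k hk
        have hk' : k < rn.length := by omega
        rw [List.getD_eq_getElem _ _ hk']
        have hmem2 : rn[k]'hk' ∈ rn := List.getElem_mem hk'
        rw [hrp.mem_iff, List.mem_range] at hmem2
        exact hmem2
      -- conclude: both loop outcomes coincide
      rw [Bool.eq_iff_iff, pvLoopA_iff, pvLoopB_iff]
      have hrangeP : ∀ (P : Int → Prop),
          (∀ i ∈ PySem.List.pyRange 0 ((n : Int) - 1) 1, P i) ↔ (∀ k : Nat, k + 1 < n → P (k : Int)) := by
        intro P
        constructor
        · intro h k hk
          refine h _ (PySem.List.mem_pyRange_one.mpr ⟨by positivity, by omega⟩)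
        · intro h i hi
          obtain ⟨h0, h1⟩ := PySem.List.mem_pyRange_one.mp hi
          have he : i = ((i.toNat : Nat) : Int) := by omega
          rw [he]
          exact h i.toNat (by omega)
      rw [hrangeP, hrangeP]
      have bridgeA : ∀ k : Nat, k + 1 < n →
          ((¬ (PySem.List.slice t (some (PySem.List.pyGetD result ((k : Int) + 1) 0)) none <
             PySem.List.slice t (some (PySem.List.pyGetD result (k : Int) 0)) none)) ↔ pvCondA t rn k) := by
        intro k hk
        have e1 : ((k : Int) + 1) = ((k + 1 : Nat) : Int) := by push_cast; ring
        rw [e1, hgetres k (by omega), hgetres (k + 1) hk,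
          PySem.List.slice_from_natCast, PySem.List.slice_from_natCast]
        exact not_lt
      have bridgeB : ∀ k : Nat, k + 1 < n → (pvBodyB t result rank (k : Int) ↔ pvCondB t rn k) := by
        intro k hk
        have e1 : ((k : Int) + 1) = ((k + 1 : Nat) : Int) := by push_cast; ring
        have hpk := hel k (by omega)
        have hqk := hel (k + 1) hk
        unfold pvBodyB pvCondB
        rw [e1, hgetres k (by omega), hgetres (k + 1) hk,
          PySem.List.pyGetD_natCast t, PySem.List.pyGetD_natCast t]
        have ep : ((rn.getD k 0 : Nat) : Int) + 1 = ((rn.getD k 0 + 1 : Nat) : Int) := by push_cast; ring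
        have eq' : ((rn.getD (k + 1) 0 : Nat) : Int) + 1 = ((rn.getD (k + 1) 0 + 1 : Nat) : Int) := by
          push_cast; ring
        rw [ep, eq']
        have hiff : ∀ x : Nat, x ≤ n →
            (if ((x : Nat) : Int) < (n : Int) then PySem.List.pyGetD rank ((x : Nat) : Int) 0 else -1)
              = pvErk rn n x := by
          intro x hx
          by_cases hxn : x < n
          · rw [if_pos (by exact_mod_cast hxn), hrank x hxn, pvErk, if_pos hxn]
          · rw [if_neg (by exact_mod_cast hxn), pvErk, if_neg hxn]
        rw [hiff _ (by omega), hiff _ (by omega)]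
        constructor
        · rintro ⟨a, b⟩
          exact ⟨not_lt.mp a, fun h => not_lt.mp (b h)⟩
        · rintro ⟨a, b⟩
          exact ⟨not_lt.mpr a, fun h => not_lt.mpr (b h)⟩
      constructor
      · intro h k hk
        exact (bridgeB k hk).mpr ((pvCore t rn hrp).mp (fun k' hk' => (bridgeA k' hk').mp (h k' hk')) k hk)
      · intro h k hk
        exact (bridgeA k hk).mpr ((pvCore t rn hrp).mpr (fun k' hk' => (bridgeB k' hk').mp (h k' hk')) k hk)

-- ===== VERDICT (by name: the statement is the Claim_ definition above) =====
theorem SPEC_spec : Claim_equal_SPEC := by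
  intro s result _
  unfold Spec_SPEC
  exact pv_main s result
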